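-- pv_equiv track=rewrite | github.com/garbaczdev/adventofcode | 2023/3/solve.py | get_number_groups
-- ===== SOURCE A (Python) =====
-- def is_int(num: str) -> bool:
--     try:
--         int(num)
--         return True
--     except:
--         return False
--
-- def get_number_groups(row: str) -> list[list[int]]:
--     number_indices = [index for index in range(len(row)) if is_int(row[index])]
--     groups = []
--     current_group = []
--     for number_index in number_indices:
--         if not current_group or current_group[-1] == number_index - 1:
--             current_group.append(number_index)
--         else:
--             groups.append(current_group)
--             current_group = [number_index]
--     if current_group:
--         groups.append(current_group)
--     return groups
-- ===== SOURCE B (Python) =====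
-- def is_int(num: str) -> bool:
--     try:
--         int(num)
--         return True
--     except:
--         return False
--
-- def get_number_groups(row: str) -> list[list[int]]:
--     groups = []
--     n = len(row)
--     i = 0
--     while i < n:
--         if is_int(row[i]):
--             j = i + 1
--             while j < n and is_int(row[j]):
--                 j += 1
--             groups.append(list(range(i, j)))
--             i = j
--         else:
--             i += 1
--     return groups
-- ===== Notes on version B (the rewrite author's own statement) =====
-- stated objective: alternative
-- what changed: B replaces A's prebuilt number_indices list and the current_group[-1] == index-1 adjacency fold by a while-loop run scanner: it skips non-digits and, at each digit, scans to the end of the digit run and appends list(range(i, j)) in one step, maintaining no partial group.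
import Mathlib
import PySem

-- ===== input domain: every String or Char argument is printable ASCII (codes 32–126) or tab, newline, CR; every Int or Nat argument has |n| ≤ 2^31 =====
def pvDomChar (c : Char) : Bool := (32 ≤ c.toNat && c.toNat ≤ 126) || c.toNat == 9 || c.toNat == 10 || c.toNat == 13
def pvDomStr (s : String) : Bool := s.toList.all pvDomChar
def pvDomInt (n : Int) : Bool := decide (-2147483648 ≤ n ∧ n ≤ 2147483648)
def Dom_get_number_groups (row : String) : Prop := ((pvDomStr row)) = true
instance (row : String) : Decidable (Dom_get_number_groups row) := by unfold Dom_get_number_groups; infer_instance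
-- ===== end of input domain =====

-- B replaces A's prebuilt number_indices list and adjacency fold by a while-loop run
-- scanner that emits each maximal digit run as list(range(i, j)) (objective: alternative).

-- ===== PORT A =====
-- is_int(num): int(num) succeeds?  (both Pythons share this helper verbatim)
def pvIsInt (c : Char) : Bool := (PySem.Int.ofChars? [c]).isSome

-- one iteration of A's loop over number_indices
def pvAStep (st : List (List Int) × List Int) (i : Int) : List (List Int) × List Int :=
  if st.2 = [] ∨ PySem.List.pyGet? st.2 (-1) = some (i - 1) then (st.1, st.2 ++ [i])
  else (st.1 ++ [st.2], [i])

def get_number_groups (row : String) : List (List Int) :=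
  let number_indices := (PySem.List.pyRange 0 (PySem.Str.len row) 1).filter
    (fun i => ((PySem.Str.pyGet? row i).map pvIsInt).getD false)
  let st := number_indices.foldl pvAStep ([], [])
  if st.2 = [] then st.1 else st.1 ++ [st.2]

-- ===== PORT B =====
-- B's outer while loop as structural recursion over the remaining characters, carrying
-- the current position p; the inner while (j advancing over digits) is the takeWhile /
-- dropWhile split of the remaining characters, and list(range(i, j)) is pyRange.
def pvGroups : List Char → Int → List (List Int)
  | [], _ => []
  | c :: cs, p =>
    if pvIsInt c then
      PySem.List.pyRange p (p + 1 + (cs.takeWhile pvIsInt).length) 1 ::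
        pvGroups (cs.dropWhile pvIsInt) (p + 1 + (cs.takeWhile pvIsInt).length)
    else pvGroups cs (p + 1)
termination_by cs => cs.length
decreasing_by
  · have := List.length_dropWhile_le (p := pvIsInt) (l := cs); simp; omega
  · simp

def get_number_groups_alt (row : String) : List (List Int) :=
  pvGroups row.toList 0

-- ===== PRECONDITION & SPEC =====
def Spec_get_number_groups (row : String) (out : List (List Int)) : Prop := out = get_number_groups_alt row
instance (row : String) (out : List (List Int)) : Decidable (Spec_get_number_groups row out) := by unfold Spec_get_number_groups; infer_instance

-- ===== CLAIM (what is proved, stated in full; the proofs are below) =====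
def Claim_equal_get_number_groups : Prop := ∀ (row : String), Dom_get_number_groups row → Spec_get_number_groups row (get_number_groups row)

-- ===== LEMMAS AND PROOFS =====

-- digit indices of the character list cs, offset by p
def pvIdxs : List Char → Int → List Int
  | [], _ => []
  | c :: cs, p => (if pvIsInt c then [p] else []) ++ pvIdxs cs (p + 1)

-- intermediate single-pass fold (proof device linking the two ports)
def pvBStep (st : List (List Int) × List Int) (ic : Int × Char) : List (List Int) × List Int :=
  if pvIsInt ic.2 then (st.1, st.2 ++ [ic.1])
  else if st.2 ≠ [] then (st.1 ++ [st.2], []) else st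

def pvFlush (st : List (List Int) × List Int) : List (List Int) :=
  if st.2 = [] then st.1 else st.1 ++ [st.2]

theorem pvLast_append (xs : List Int) (x : Int) :
    PySem.List.pyGet? (xs ++ [x]) (-1) = some x := by
  simp [PySem.List.pyGet?, PySem.List.pyIdx?]

theorem pvLast_ne_nil (xs : List Int) (t : Int)
    (h : PySem.List.pyGet? xs (-1) = some t) : xs ≠ [] := by
  intro hnil
  subst hnil
  simp [PySem.List.pyGet?, PySem.List.pyIdx?] at h

-- A's index list is pvIdxs of the suffix
theorem pvL1 (l pre : List Char) (row : String) (h : row.toList = pre ++ l) :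
    (PySem.List.pyRange (pre.length : Int) ((pre.length : Int) + l.length) 1).filter
      (fun i => ((PySem.Str.pyGet? row i).map pvIsInt).getD false) = pvIdxs l (pre.length : Int) := by
  induction l generalizing pre with
  | nil =>
      simp [pvIdxs, PySem.List.pyRange_one_eq_nil]
  | cons c cs ih =>
      have hcons : PySem.List.pyRange (pre.length : Int) ((pre.length : Int) + (c :: cs).length) 1
          = (pre.length : Int) :: PySem.List.pyRange ((pre.length : Int) + 1) ((pre.length : Int) + (c :: cs).length) 1 := by
        apply PySem.List.pyRange_one_cons
        simp
      rw [hcons]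
      have hhead : ((PySem.Str.pyGet? row (pre.length : Int)).map pvIsInt).getD false = pvIsInt c := by
        have : PySem.Str.pyGet? row (pre.length : Int) = row.toList[pre.length]? := by
          simp
        rw [this, h]
        simp
      have htail := ih (pre ++ [c]) (by simpa using h)
      have hlen : ((pre ++ [c]).length : Int) = (pre.length : Int) + 1 := by simp
      rw [hlen] at htail
      rw [List.filter_cons]
      rw [hhead]
      simp only [pvIdxs]
      by_cases hd : pvIsInt c
      · simp only [hd, if_pos]
        rw [show ((pre.length : Int) + (((c :: cs).length : Nat) : Int)) = ((pre.length : Int) + 1) + (cs.length : Int) by simp; omega]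
        rw [htail]
        simp
      · simp only [hd]
        rw [show ((pre.length : Int) + (((c :: cs).length : Nat) : Int)) = ((pre.length : Int) + 1) + (cs.length : Int) by simp; omega]
        rw [htail]
        simp

-- if the running group ended at least two positions earlier, A's fold may flush it now
theorem pvStale (cs : List Char) (p : Int) (g : List (List Int)) (cur : List Int) (t : Int)
    (hl : PySem.List.pyGet? cur (-1) = some t) (ht : t + 2 ≤ p) :
    pvFlush ((pvIdxs cs p).foldl pvAStep (g, cur)) =
      pvFlush ((pvIdxs cs p).foldl pvAStep (g ++ [cur], [])) := by
  induction cs generalizing p with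
  | nil =>
      have hne := pvLast_ne_nil cur t hl
      simp [pvIdxs, pvFlush, hne]
  | cons c cs ih =>
      simp only [pvIdxs]
      by_cases hd : pvIsInt c
      · simp only [hd, if_pos, List.cons_append, List.nil_append, List.foldl_cons]
        have hne := pvLast_ne_nil cur t hl
        have hstep : pvAStep (g, cur) p = (g ++ [cur], [p]) := by
          unfold pvAStep
          have : ¬ (cur = [] ∨ PySem.List.pyGet? cur (-1) = some (p - 1)) := by
            rintro (h1 | h2)
            · exact hne h1
            · rw [hl] at h2
              have := Option.some.inj h2
              omega
          simp [this]
        have hstep' : pvAStep (g ++ [cur], []) p = (g ++ [cur], [p]) := by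
          unfold pvAStep; simp
        rw [hstep, hstep']
      · simp only [hd, Bool.false_eq_true, if_false, List.nil_append]
        exact ih (p + 1) (by omega)

-- A's fold over digit indices agrees with the single-pass fold over enumerate
theorem pvMain (cs : List Char) (p : Int) (g : List (List Int)) (cur : List Int)
    (h : cur = [] ∨ PySem.List.pyGet? cur (-1) = some (p - 1)) :
    pvFlush ((pvIdxs cs p).foldl pvAStep (g, cur)) =
      pvFlush ((PySem.List.enumerate cs p).foldl pvBStep (g, cur)) := by
  induction cs generalizing p g cur with
  | nil => simp [pvIdxs, PySem.List.enumerate_nil]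
  | cons c cs ih =>
      rw [PySem.List.enumerate_cons]
      simp only [pvIdxs, List.foldl_cons]
      by_cases hd : pvIsInt c
      · simp only [hd, if_pos, List.cons_append, List.nil_append, List.foldl_cons]
        have hstepA : pvAStep (g, cur) p = (g, cur ++ [p]) := by
          unfold pvAStep
          have : cur = [] ∨ PySem.List.pyGet? cur (-1) = some (p - 1) := h
          simp [this]
        have hstepB : pvBStep (g, cur) (p, c) = (g, cur ++ [p]) := by
          unfold pvBStep; simp [hd]
        rw [hstepA, hstepB]
        exact ih (p + 1) g (cur ++ [p]) (Or.inr (by rw [show p + 1 - 1 = p by omega]; exact pvLast_append cur p))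
      · simp only [hd, Bool.false_eq_true, if_false, List.nil_append]
        have hstepB : pvBStep (g, cur) (p, c) = if cur ≠ [] then (g ++ [cur], ([] : List Int)) else (g, cur) := by
          unfold pvBStep; simp [hd]
        rw [hstepB]
        rcases h with hnil | hlast
        · subst hnil
          rw [if_neg (by simp)]
          exact ih (p + 1) g [] (Or.inl rfl)
        · have hne := pvLast_ne_nil cur (p - 1) hlast
          rw [if_pos hne]
          rw [pvStale cs (p + 1) g cur (p - 1) hlast (by omega)]
          exact ih (p + 1) (g ++ [cur]) [] (Or.inl rfl)

-- folding the single-pass step over an all-digit block appends the index range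
theorem pvRun (ds : List Char) (p : Int) (g : List (List Int)) (cur : List Int)
    (hall : ∀ d ∈ ds, pvIsInt d = true) :
    (PySem.List.enumerate ds p).foldl pvBStep (g, cur) =
      (g, cur ++ PySem.List.pyRange p (p + ds.length) 1) := by
  induction ds generalizing p cur with
  | nil => simp [PySem.List.enumerate_nil, PySem.List.pyRange_one_eq_nil]
  | cons d ds ih =>
      rw [PySem.List.enumerate_cons, List.foldl_cons]
      have hd : pvIsInt d = true := hall d (by simp)
      have hstep : pvBStep (g, cur) (p, d) = (g, cur ++ [p]) := by
        unfold pvBStep; simp [hd]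
      rw [hstep, ih (p + 1) (cur ++ [p]) (fun x hx => hall x (by simp [hx]))]
      have h0 : (0:Int) ≤ (ds.length : Int) := by positivity
      have hcons : PySem.List.pyRange p (p + ((d :: ds).length : Int)) 1
          = p :: PySem.List.pyRange (p + 1) (p + 1 + (ds.length : Int)) 1 := by
        rw [show (p + ((d :: ds).length : Int)) = (p + 1) + (ds.length : Int) by simp [List.length_cons]; omega]
        exact PySem.List.pyRange_one_cons (by omega)
      rw [hcons]
      simp

-- the single-pass fold, flushed, computes B's run-scanner groups
theorem pvC (cs : List Char) (p : Int) : ∀ g : List (List Int),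
    pvFlush ((PySem.List.enumerate cs p).foldl pvBStep (g, [])) = g ++ pvGroups cs p := by
  induction cs, p using pvGroups.induct with
  | case1 p => intro g; simp [PySem.List.enumerate_nil, pvFlush, pvGroups]
  | case2 c cs p hd ih =>
      intro g
      rw [PySem.List.enumerate_cons, List.foldl_cons]
      have hstep : pvBStep (g, []) (p, c) = (g, [p]) := by
        unfold pvBStep; simp [hd]
      rw [hstep]
      set run := cs.takeWhile pvIsInt with hrund
      set rest := cs.dropWhile pvIsInt with hrestd
      have hsplit : cs = run ++ rest := (List.takeWhile_append_dropWhile).symm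
      have h0 : (0:Int) ≤ (run.length : Int) := by positivity
      have hgrp : PySem.List.pyRange p (p + 1 + (run.length : Int)) 1
          = p :: PySem.List.pyRange (p + 1) (p + 1 + (run.length : Int)) 1 :=
        PySem.List.pyRange_one_cons (by omega)
      have hne : PySem.List.pyRange p (p + 1 + (run.length : Int)) 1 ≠ [] := by
        rw [hgrp]; simp
      rw [show PySem.List.enumerate cs (p + 1)
            = PySem.List.enumerate run (p + 1)
              ++ PySem.List.enumerate rest (p + 1 + (run.length : Int)) by
        conv_lhs => rw [hsplit]
        exact PySem.List.enumerate_append _ _ _]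
      rw [List.foldl_append]
      rw [pvRun run (p + 1) g [p] (fun d hd' => List.mem_takeWhile_imp hd')]
      have hcollapse : ([p] ++ PySem.List.pyRange (p + 1) (p + 1 + (run.length : Int)) 1)
          = PySem.List.pyRange p (p + 1 + (run.length : Int)) 1 := by
        rw [hgrp]; simp
      rw [hcollapse]
      have hGroups : pvGroups (c :: cs) p
          = PySem.List.pyRange p (p + 1 + (run.length : Int)) 1
            :: pvGroups rest (p + 1 + (run.length : Int)) := by
        simp only [pvGroups, hd, if_pos]
        rfl
      rcases hcase : rest with _ | ⟨d, rest'⟩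
      · simp only [PySem.List.enumerate_nil, List.foldl_nil]
        unfold pvFlush
        rw [if_neg hne, hGroups, hcase]
        simp [pvGroups]
      · have hdw : cs.dropWhile pvIsInt = d :: rest' := by rw [← hrestd]; exact hcase
        have hnd : pvIsInt d = false := by
          have := List.head_dropWhile_not pvIsInt (l := cs) (by simp [hdw])
          simpa [hdw] using this
        have hGstep : pvGroups (d :: rest') (p + 1 + (run.length : Int))
            = pvGroups rest' (p + 1 + (run.length : Int) + 1) := by
          simp [pvGroups, hnd]
        rw [PySem.List.enumerate_cons, List.foldl_cons]
        have hstep2 : pvBStep (g, PySem.List.pyRange p (p + 1 + (run.length : Int)) 1)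
              (p + 1 + (run.length : Int), d)
            = (g ++ [PySem.List.pyRange p (p + 1 + (run.length : Int)) 1], []) := by
          unfold pvBStep; simp [hnd, hne]
        rw [hstep2]
        have ihrest := ih (g ++ [PySem.List.pyRange p (p + 1 + (run.length : Int)) 1])
        rw [hcase, PySem.List.enumerate_cons, List.foldl_cons] at ihrest
        have hstep3 : pvBStep (g ++ [PySem.List.pyRange p (p + 1 + (run.length : Int)) 1], [])
              (p + 1 + (run.length : Int), d)
            = (g ++ [PySem.List.pyRange p (p + 1 + (run.length : Int)) 1], []) := by
          unfold pvBStep; simp [hnd]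
        rw [hstep3, hGstep] at ihrest
        rw [ihrest, hGroups, hcase, hGstep]
        simp
  | case3 c cs p hd ih =>
      intro g
      rw [PySem.List.enumerate_cons, List.foldl_cons]
      have hstep : pvBStep (g, []) (p, c) = (g, []) := by
        unfold pvBStep; simp [hd]
      rw [hstep, ih g]
      rw [show pvGroups (c :: cs) p = pvGroups cs (p + 1) by simp [pvGroups, hd]]

-- ===== VERDICT (by name: the statement is the Claim_ definition above) =====
theorem get_number_groups_spec : Claim_equal_get_number_groups := by
  intro row _
  unfold Spec_get_number_groups get_number_groups get_number_groups_alt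
  have h0 := pvL1 row.toList [] row (by simp)
  simp only [List.length_nil, Nat.cast_zero, zero_add] at h0
  have hm := pvMain row.toList 0 [] [] (Or.inl rfl)
  have hc := pvC row.toList 0 []
  simp only [pvFlush] at hm hc
  have hlen : PySem.Str.len row = ((row.toList.length : Nat) : Int) := by simp
  rw [hlen, h0]
  rw [hm]
  simpa using hc
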